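-- pv_equiv track=rewrite | github.com/jusstsdk/ISP-2022-053505 | task_1/main.py | top_ngrams
-- ===== SOURCE A (Python) =====
-- def format_text(text):
--     text = text.lower()
--     for symbol in ".!?-():;,\'\"":
--         text = text.replace(symbol, "")
--     return text
--
-- def get_words_dict(text):
--     words_dict = dict()
--
--     for word in format_text(text).split():
--         words_dict.setdefault(word, 0)
--         words_dict[word] += 1
--
--     return words_dict
--
-- def top_ngrams(text, k, n):
--     words_dict = get_words_dict(text)
--     sorted_tuples = sorted(words_dict.items(), key=lambda x: x[1], reverse=True)
--     sorted_dict = dict(sorted_tuples)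
--     copy_sorted_dict = sorted_dict.copy()
--
--     for key in copy_sorted_dict:
--         if len(key) != n:
--             del sorted_dict[key]
--
--     return list(sorted_dict.keys())[:k]
-- ===== SOURCE B (Python) =====
-- def format_text(text):
--     text = text.lower()
--     for symbol in ".!?-():;,\'\"":
--         text = text.replace(symbol, "")
--     return text
--
-- def top_ngrams(text, k, n):
--     counts = {}
--     for w in format_text(text).split():
--         if len(w) == n:
--             counts[w] = counts.get(w, 0) + 1
--     items = sorted(counts.items(), key=lambda it: it[1], reverse=True)
--     return [w for w, _ in items][:k]
-- ===== Notes on version B (the rewrite author's own statement) =====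
-- stated objective: simpler
-- what changed: B filters words by length inside the counting loop (one small dict), sorts only those items once by count descending, and slices the keys, instead of A's count-everything, sort-everything, rebuild-a-dict, copy-and-delete-wrong-length passes.
import Mathlib
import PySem

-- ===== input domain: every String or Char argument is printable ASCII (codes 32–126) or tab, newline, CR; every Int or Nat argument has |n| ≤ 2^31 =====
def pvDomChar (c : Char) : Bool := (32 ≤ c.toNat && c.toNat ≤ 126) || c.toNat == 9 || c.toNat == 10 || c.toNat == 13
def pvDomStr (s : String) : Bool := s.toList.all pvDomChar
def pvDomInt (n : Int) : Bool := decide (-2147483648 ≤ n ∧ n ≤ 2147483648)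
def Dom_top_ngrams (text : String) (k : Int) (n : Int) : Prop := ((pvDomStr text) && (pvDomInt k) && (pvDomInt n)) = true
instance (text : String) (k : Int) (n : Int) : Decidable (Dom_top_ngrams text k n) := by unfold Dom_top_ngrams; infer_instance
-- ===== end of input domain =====

-- B filters words by length inside the counting loop and stable-sorts only those items once,
-- replacing A's count-all / sort-all / rebuild-dict / copy-and-delete passes (objective: simpler).

-- ===== PORT A =====
-- helper shared by Source A and Source B (identical source in both): lowercase, strip punctuation
def format_text (text : String) : String :=
  (".!?-():;,'\"").toList.foldl (fun t symbol => PySem.Str.replace t (String.ofList [symbol]) "") (PySem.Str.lower text)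

def get_words_dict (text : String) : PySem.Dict String Int :=
  (PySem.Str.split₀ (format_text text)).foldl
    (fun d word =>
      let d' := d.setdefault word 0
      d'.insert word (d'.getD word 0 + 1))
    PySem.Dict.empty

def top_ngrams (text : String) (k : Int) (n : Int) : List String :=
  let words_dict := get_words_dict text
  let sorted_tuples := PySem.List.sorted words_dict.items (fun x => x.2) true
  let sorted_dict := PySem.Dict.ofList sorted_tuples
  let copy_sorted_dict := sorted_dict
  let final := copy_sorted_dict.keys.foldl
    (fun d key => if PySem.Str.len key ≠ n then d.erase key else d) sorted_dict
  PySem.List.slice final.keys none (some k)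

def top_ngrams_alt (text : String) (k : Int) (n : Int) : List String :=
  let counts := (PySem.Str.split₀ (format_text text)).foldl
    (fun d w => if PySem.Str.len w = n then d.insert w (d.getD w 0 + 1) else d)
    (PySem.Dict.empty : PySem.Dict String Int)
  let items := PySem.List.sorted counts.items (fun it => it.2) true
  PySem.List.slice (items.map (fun it => it.1)) none (some k)

-- ===== PRECONDITION & SPEC =====
def Spec_top_ngrams (text : String) (k : Int) (n : Int) (out : List String) : Prop := out = top_ngrams_alt text k n
instance (text : String) (k : Int) (n : Int) (out : List String) : Decidable (Spec_top_ngrams text k n out) := by unfold Spec_top_ngrams; infer_instance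

-- ===== CLAIM (what is proved, stated in full; the proofs are below) =====
def Claim_equal_top_ngrams : Prop := ∀ (text : String) (k : Int) (n : Int), Dom_top_ngrams text k n → Spec_top_ngrams text k n (top_ngrams text k n)

-- ===== LEMMAS AND PROOFS =====

-- Python's insertion into a sorted prefix, one unfolding step
theorem pv_insertBy_cons {α : Type} (before : α → α → Bool) (x y : α) (ys : List α) :
    PySem.List.insertBy before x (y :: ys)
      = if before x y then x :: y :: ys else y :: PySem.List.insertBy before x ys := rfl

-- filtering commutes with inserting into a non-increasing accumulator
theorem pv_filter_insertBy {α : Type} (key : α → Int) (p : α → Bool) (x : α)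
    (ys : List α) (hys : ys.Pairwise (fun a b => key b ≤ key a)) :
    (PySem.List.insertBy (fun a b => decide (key b < key a)) x ys).filter p
      = if p x then PySem.List.insertBy (fun a b => decide (key b < key a)) x (ys.filter p) else ys.filter p := by
  induction ys with
  | nil => cases hp : p x <;> simp [PySem.List.insertBy, hp]
  | cons y ys ih =>
      rcases List.pairwise_cons.mp hys with ⟨hy, hys'⟩
      rw [pv_insertBy_cons]
      by_cases hb : key y < key x
      · rw [if_pos (by simpa using hb)]
        cases hp : p x with
        | false => simp [List.filter_cons, hp]
        | true =>
          cases hpy : p y with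
          | true =>
              simp [hp, hpy, pv_insertBy_cons, hb]
          | false =>
              simp only [List.filter_cons, hp, hpy, if_true]
              cases hf : ys.filter p with
              | nil => simp [PySem.List.insertBy]
              | cons z t =>
                  have hz : z ∈ ys := List.mem_of_mem_filter (hf ▸ List.mem_cons_self (l := t))
                  simp only [Bool.false_eq_true, if_false]
                  rw [pv_insertBy_cons, if_pos (by simpa using lt_of_le_of_lt (hy z hz) hb)]
      · rw [if_neg (by simpa using hb)]
        cases hpy : p y with
        | false => simpa [List.filter_cons, hpy] using ih hys'
        | true =>
            simp only [List.filter_cons, hpy]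
            rw [ih hys']
            cases hp : p x with
            | false => simp
            | true =>
                simp only [if_true]
                rw [pv_insertBy_cons, if_neg (by simpa using hb)]

-- insertBy preserves the non-increasing invariant
theorem pv_insertBy_pairwise {α : Type} (key : α → Int) (x : α)
    (ys : List α) (hys : ys.Pairwise (fun a b => key b ≤ key a)) :
    (PySem.List.insertBy (fun a b => decide (key b < key a)) x ys).Pairwise (fun a b => key b ≤ key a) := by
  induction ys with
  | nil => simp [PySem.List.insertBy]
  | cons y ys ih =>
      rw [pv_insertBy_cons]
      rcases List.pairwise_cons.mp hys with ⟨hy, hys'⟩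
      by_cases hb : key y < key x
      · rw [if_pos (by simpa using hb)]
        refine List.pairwise_cons.mpr ⟨?_, hys⟩
        intro z hz
        rcases List.mem_cons.mp hz with rfl | hz
        · exact le_of_lt hb
        · exact le_of_lt (lt_of_le_of_lt (hy z hz) hb)
      · rw [if_neg (by simpa using hb)]
        refine List.pairwise_cons.mpr ⟨?_, ih hys'⟩
        intro z hz
        rcases (PySem.List.mem_insertBy _ x z ys).mp hz with rfl | hz
        · exact le_of_not_gt hb
        · exact hy z hz

-- filtering commutes with the whole insertion-sort fold
theorem pv_filter_foldl {α : Type} (key : α → Int) (p : α → Bool) (xs : List α) :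
    ∀ (acc : List α), acc.Pairwise (fun a b => key b ≤ key a) →
    (xs.foldl (fun acc x => PySem.List.insertBy (fun a b => decide (key b < key a)) x acc) acc).filter p
      = (xs.filter p).foldl (fun acc x => PySem.List.insertBy (fun a b => decide (key b < key a)) x acc) (acc.filter p) := by
  induction xs with
  | nil => intro acc _; rfl
  | cons x xs ih =>
      intro acc hacc
      simp only [List.foldl_cons, List.filter_cons]
      rw [ih _ (pv_insertBy_pairwise key x acc hacc), pv_filter_insertBy key p x acc hacc]
      cases hp : p x <;> simp

-- filtering commutes with Python's stable reverse sort
theorem pv_filter_sorted {α : Type} (xs : List α) (key : α → Int) (p : α → Bool) :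
    (PySem.List.sorted xs key true).filter p = PySem.List.sorted (xs.filter p) key true := by
  rw [PySem.List.sorted_rev_eq_foldl_insertBy, PySem.List.sorted_rev_eq_foldl_insertBy]
  simpa using pv_filter_foldl key p xs [] (by simp)

-- A's delete loop: folding `erase` over a key list filters the items
theorem pv_erase_fold (ks : List String) :
    ∀ (d : PySem.Dict String Int),
    (ks.foldl PySem.Dict.erase d).items = d.items.filter (fun pr => decide (pr.1 ∉ ks)) := by
  induction ks with
  | nil => intro d; simp
  | cons a ks ih =>
      intro d
      rw [List.foldl_cons, ih]
      show ((d.erase a).items).filter _ = _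
      simp only [PySem.Dict.erase, List.filter_filter]
      refine List.filter_congr ?_
      intro pr _
      by_cases he : pr.1 = a
      · simp [he]
      · simp [he]

-- ordered dedup (dict key order) commutes with filter
theorem pv_ofList_filter (xs : List String) (p : String → Bool) :
    PySem.Set.ofList (xs.filter p) = (PySem.Set.ofList xs).filter p := by
  induction xs using List.reverseRecOn with
  | nil => rfl
  | append_singleton xs x ih =>
      rw [List.filter_append, PySem.Set.ofList_append_singleton]
      cases hp : p x
      · simp only [List.filter_cons, hp, Bool.false_eq_true, if_false, List.filter_nil,
          List.append_nil, ih]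
        by_cases hm : x ∈ PySem.Set.ofList xs
        · rw [PySem.Set.add_of_mem hm]
        · rw [PySem.Set.add_of_not_mem hm, List.filter_append]
          simp [hp]
      · simp only [List.filter_cons, hp, if_true, List.filter_nil]
        rw [PySem.Set.ofList_append_singleton, ih]
        by_cases hm : x ∈ PySem.Set.ofList xs
        · rw [PySem.Set.add_of_mem hm, PySem.Set.add_of_mem (by simp [List.mem_filter, hm, hp])]
        · rw [PySem.Set.add_of_not_mem hm,
            PySem.Set.add_of_not_mem (fun h => hm (List.mem_of_mem_filter h)), List.filter_append]
          simp [hp]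

-- A's counting step (setdefault then +=1) is the standard insert-getD counting step
theorem pv_count_step (d : PySem.Dict String Int) (w : String) :
    (let d' := d.setdefault w 0; d'.insert w (d'.getD w 0 + 1)) = d.insert w (d.getD w 0 + 1) := by
  cases h : d.contains w with
  | true => simp [PySem.Dict.setdefault_of_contains d 0 h]
  | false =>
      simp only [PySem.Dict.setdefault_of_not_contains d 0 h,
        PySem.Dict.getD_insert_self, PySem.Dict.insert_insert_self,
        PySem.Dict.getD_of_not_contains d 0 h]

theorem pv_main (text : String) (k n : Int) : top_ngrams text k n = top_ngrams_alt text k n := by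
  unfold top_ngrams top_ngrams_alt get_words_dict
  dsimp only
  set ws := PySem.Str.split₀ (format_text text) with hws
  set p : String → Bool := fun w => decide (PySem.Str.len w = n) with hp
  set f : String → String × Int := fun w => (w, (ws.count w : Int)) with hf
  -- A's counting loop is the standard counter
  have hstep : (fun (d : PySem.Dict String Int) (word : String) =>
      let d' := d.setdefault word 0
      d'.insert word (d'.getD word 0 + 1))
      = fun d word => d.insert word (d.getD word 0 + 1) :=
    funext fun d => funext fun w => pv_count_step d w
  rw [hstep, PySem.Dict.foldl_insert_getD_add_one_eq_counter, PySem.Dict.items_counter]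
  -- B's counting loop is the counter of the filtered word list
  simp only [PySem.List.foldl_ite_eq_foldl_filter]
  have hcnt : List.foldl (fun (d : PySem.Dict String Int) w => d.insert w (d.getD w 0 + 1))
      PySem.Dict.empty (List.filter (fun x => decide (PySem.Str.len x = n)) ws)
      = PySem.Dict.counter (List.filter (fun x => decide (PySem.Str.len x = n)) ws) :=
    PySem.Dict.foldl_insert_getD_add_one_eq_counter _
  rw [hcnt, PySem.Dict.items_counter]
  set M : List (String × Int) := (PySem.Set.ofList ws).map f with hM
  set L : List (String × Int) := PySem.List.sorted M (fun x => x.2) true with hL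
  -- B's items list = M filtered on the first component
  have hBitems : (PySem.Set.ofList (ws.filter p)).map
      (fun w => (w, ((ws.filter p).count w : Int))) = M.filter (fun pr => p pr.1) := by
    rw [pv_ofList_filter, hM, List.filter_map]
    have hcomp : ((fun pr : String × Int => p pr.1) ∘ f) = p := rfl
    rw [hcomp]
    refine List.map_congr_left ?_
    intro w hw
    have hpw : p w = true := (List.mem_filter.mp hw).2
    have hc := List.count_filter (p := p) (a := w) (l := ws) hpw
    rw [hf]
    show (w, ((ws.filter p).count w : Int)) = (w, (ws.count w : Int))
    rw [hc]
  -- the sorted dict's items are exactly the sorted tuple list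
  have h2 : M.map (fun a : String × Int => a.1) = PySem.Set.ofList ws := by
    calc M.map (fun a : String × Int => a.1)
        = (PySem.Set.ofList ws).map ((fun a : String × Int => a.1) ∘ f) := by
          rw [hM, List.map_map]
      _ = (PySem.Set.ofList ws).map (fun w => w) := rfl
      _ = PySem.Set.ofList ws := List.map_id' _
  have hLfst : (L.map (fun a : String × Int => a.1)).Perm (PySem.Set.ofList ws) := by
    have h1 := (PySem.List.sorted_perm M (fun x : String × Int => x.2) true).map
      (fun a : String × Int => a.1)
    rw [h2] at h1
    exact h1
  have hnod : (L.map (fun a : String × Int => a.1)).Nodup :=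
    (hLfst.nodup_iff).mpr (PySem.Set.nodup_ofList ws)
  have hDitems : (PySem.Dict.ofList L).items = L := by
    show (PySem.Dict.empty.update L).items = L
    unfold PySem.Dict.update
    rw [PySem.Dict.items_foldl_insert_fresh L (fun a => a.1) (fun a => a.2) PySem.Dict.empty
      (fun a _ => PySem.Dict.contains_empty a.1) hnod]
    show [] ++ L.map (fun a => (a.1, a.2)) = L
    simp
  -- the delete loop filters the sorted tuples down to length-n keys
  simp only [← hp]
  rw [hBitems, ← pv_filter_sorted M (fun x => x.2) (fun pr => p pr.1), ← hL]
  simp only [PySem.Dict.keys, hDitems, pv_erase_fold]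
  refine congrArg (fun l : List String => PySem.List.slice l none (some k)) ?_
  refine congrArg (List.map (fun x : String × Int => x.1)) ?_
  refine List.filter_congr ?_
  intro pr hpr
  have hmem : pr.1 ∈ L.map (fun x : String × Int => x.1) := List.mem_map.mpr ⟨pr, hpr, rfl⟩
  simp [hp, hmem]

-- ===== VERDICT (by name: the statement is the Claim_ definition above) =====
theorem top_ngrams_spec : Claim_equal_top_ngrams := by
  intro text k n _
  exact pv_main text k n
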